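-- pv_equiv track=rewrite | github.com/atehe/stores_scraper | aldi_get_subcaregories.py | excluded_keyword_in
-- ===== SOURCE A (Python) =====
-- def excluded_keyword_in(word):
--     excluded_tags = [
--         "all ",
--         " all",
--         "offer",
--         "about",
--         "price",
--         "inspired",
--         "best of",
--     ]
--     for tag in excluded_tags:
--         if tag in word:
--             return True
--     return False
-- ===== SOURCE B (Python) =====
-- _TAGS = ("all ", " all", "offer", "about", "price", "inspired", "best of")
-- _WIDTH = max(map(len, _TAGS))
--
--
-- def excluded_keyword_in(word):
--     """Stream through word once with a sliding window of the last _WIDTH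
--     characters: some tag occurs in word iff some tag ends at some position."""
--     window = ""
--     for ch in word:
--         window = (window + ch)[-_WIDTH:]
--         if window.endswith(_TAGS):
--             return True
--     return False
-- ===== Notes on version B (the rewrite author's own statement) =====
-- stated objective: alternative
-- what changed: B replaces A's seven independent per-tag substring scans (one pass over word per tag, early return) by a single left-to-right streaming pass that keeps a sliding window of the last 8 characters (8 = max tag length) and returns True as soon as any tag ends at the current position.
import Mathlib
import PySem

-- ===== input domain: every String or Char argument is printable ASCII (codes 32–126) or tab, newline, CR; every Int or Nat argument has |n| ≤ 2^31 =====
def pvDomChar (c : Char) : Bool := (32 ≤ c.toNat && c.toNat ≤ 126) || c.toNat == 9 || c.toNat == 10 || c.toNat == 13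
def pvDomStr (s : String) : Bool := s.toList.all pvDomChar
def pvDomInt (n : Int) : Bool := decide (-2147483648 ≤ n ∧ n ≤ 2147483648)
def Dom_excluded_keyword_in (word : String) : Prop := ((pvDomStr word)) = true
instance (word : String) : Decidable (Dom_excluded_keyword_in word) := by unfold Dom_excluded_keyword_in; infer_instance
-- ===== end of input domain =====

-- B replaces A's per-tag substring scans by one streaming pass keeping a sliding window of the last 8 characters (alternative algorithm; same asymptotic cost).


-- ===== PORT A =====
-- A's excluded_tags list, built each call
def pvTagsA : List String :=
  ["all ", " all", "offer", "about", "price", "inspired", "best of"]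

-- 'for tag in excluded_tags: if tag in word: return True' / 'return False'
def pvLoopA (tags : List String) (word : String) : Bool :=
  match tags with
  | [] => false
  | t :: ts => if PySem.Str.isIn t word then true else pvLoopA ts word

def excluded_keyword_in (word : String) : Bool :=
  pvLoopA pvTagsA word

-- ===== PORT B =====
-- B's module-level _TAGS tuple
def pvTagsB : List String :=
  ["all ", " all", "offer", "about", "price", "inspired", "best of"]

-- _WIDTH = max(map(len, _TAGS))
def pvWidthB : Nat :=
  ((pvTagsB.map (fun t => t.toList.length)).max?).getD 0

-- 'window = (window + ch)[-_WIDTH:]' — Python's negative-start slice keeps the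
-- last _WIDTH characters (start clamped to 0 on short strings): exact as drop (len - W)
def pvStepB (window : List Char) (c : Char) : List Char :=
  let w := window ++ [c]
  w.drop (w.length - pvWidthB)

-- the for-loop with early return: consume the characters, stopping at the first
-- window for which 'window.endswith(_TAGS)' holds
def pvScanB (window : List Char) (s : List Char) : Bool :=
  match s with
  | [] => false
  | c :: rest =>
      let w := pvStepB window c
      if pvTagsB.any (fun t => t.toList.isSuffixOf w) then true
      else pvScanB w rest

def excluded_keyword_in_alt (word : String) : Bool :=
  pvScanB [] word.toList

-- ===== PRECONDITION & SPEC =====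
def Spec_excluded_keyword_in (word : String) (out : Bool) : Prop := out = excluded_keyword_in_alt word
instance (word : String) (out : Bool) : Decidable (Spec_excluded_keyword_in word out) := by unfold Spec_excluded_keyword_in; infer_instance

-- ===== CLAIM (what is proved, stated in full; the proofs are below) =====
def Claim_equal_excluded_keyword_in : Prop := ∀ (word : String), Dom_excluded_keyword_in word → Spec_excluded_keyword_in word (excluded_keyword_in word)

-- ===== LEMMAS AND PROOFS =====

-- the window kept by B: the last (at most) _WIDTH characters of the consumed text
def pvLastW (l : List Char) : List Char := l.drop (l.length - pvWidthB)

theorem pvLastW_suffix (l : List Char) : pvLastW l <:+ l := List.drop_suffix _ _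

theorem pvLastW_length (l : List Char) : (pvLastW l).length = min pvWidthB l.length := by
  simp [pvLastW]; omega

-- suffixes of the same list are totally ordered by length
theorem pv_suffix_of_suffix (t u l : List Char) (ht : t <:+ l) (hu : u <:+ l)
    (hlen : t.length ≤ u.length) : t <:+ u := by
  rcases ht with ⟨a, rfl⟩
  rcases hu with ⟨b, hb⟩
  have h1 : b <+: a := by
    refine List.prefix_of_prefix_length_le ⟨u, hb⟩ (List.prefix_append a t) ?_
    have : b.length + u.length = a.length + t.length := by
      have := congrArg List.length hb; simpa using this
    omega
  rcases h1 with ⟨c, rfl⟩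
  refine ⟨c, ?_⟩
  rw [List.append_assoc] at hb
  exact (List.append_cancel_left hb).symm

-- a short suffix of l is exactly a suffix of the window over l
theorem pvLastW_suffix_iff (t l : List Char) (h : t.length ≤ pvWidthB) :
    t <:+ pvLastW l ↔ t <:+ l := by
  constructor
  · intro hs; exact hs.trans (pvLastW_suffix l)
  · intro hs
    refine pv_suffix_of_suffix t (pvLastW l) l hs (pvLastW_suffix l) ?_
    have h1 := pvLastW_length l
    have h2 : t.length ≤ l.length := hs.length_le
    omega

-- stepping the truncated window equals truncating the grown text
theorem pvStepB_eq (done : List Char) (c : Char) :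
    pvStepB (pvLastW done) c = pvLastW (done ++ [c]) := by
  have hsub : pvStepB (pvLastW done) c <:+ done ++ [c] := by
    have h1 : pvStepB (pvLastW done) c <:+ pvLastW done ++ [c] := List.drop_suffix _ _
    have h2 : pvLastW done ++ [c] <:+ done ++ [c] := by
      rcases pvLastW_suffix done with ⟨a, ha⟩
      exact ⟨a, by rw [← List.append_assoc, ha]⟩
    exact h1.trans h2
  have hlen : (pvStepB (pvLastW done) c).length = (pvLastW (done ++ [c])).length := by
    have h1 := pvLastW_length done
    have h2 := pvLastW_length (done ++ [c])
    simp only [pvStepB, List.length_drop, List.length_append, List.length_cons,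
      List.length_nil] at *
    omega
  have h3 := pvLastW_suffix (done ++ [c])
  have h4 : pvStepB (pvLastW done) c <:+ pvLastW (done ++ [c]) :=
    pv_suffix_of_suffix _ _ _ hsub h3 (le_of_eq hlen)
  exact h4.eq_of_length hlen

theorem pvTag_len (t : String) (ht : t ∈ pvTagsB) : t.toList.length ≤ pvWidthB := by
  fin_cases ht <;> decide

theorem pvTag_ne_nil (t : String) (ht : t ∈ pvTagsB) : t.toList ≠ [] := by
  fin_cases ht <;> decide

-- B's loop invariant: scanning from the window over 'done' finds exactly the tags
-- ending at some strictly later position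
theorem pvScanB_iff (s : List Char) : ∀ done : List Char,
    (pvScanB (pvLastW done) s = true ↔
      ∃ t ∈ pvTagsB, ∃ i, 1 ≤ i ∧ i ≤ s.length ∧ t.toList <:+ done ++ s.take i) := by
  induction s with
  | nil => intro done; simp [pvScanB]
  | cons c rest ih =>
    intro done
    rw [show pvScanB (pvLastW done) (c :: rest) =
        (if pvTagsB.any (fun t => t.toList.isSuffixOf (pvLastW (done ++ [c]))) then true
         else pvScanB (pvLastW (done ++ [c])) rest) by
      simp only [pvScanB, pvStepB_eq]]
    have hnow : (pvTagsB.any fun t => t.toList.isSuffixOf (pvLastW (done ++ [c]))) = true ↔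
        ∃ t ∈ pvTagsB, t.toList <:+ done ++ [c] := by
      simp only [List.any_eq_true, List.isSuffixOf_iff_suffix]
      exact ⟨fun ⟨t, ht, h⟩ => ⟨t, ht, (pvLastW_suffix_iff _ _ (pvTag_len t ht)).mp h⟩,
             fun ⟨t, ht, h⟩ => ⟨t, ht, (pvLastW_suffix_iff _ _ (pvTag_len t ht)).mpr h⟩⟩
    have hsplit : (∃ t ∈ pvTagsB, ∃ i, 1 ≤ i ∧ i ≤ (c :: rest).length ∧
          t.toList <:+ done ++ (c :: rest).take i) ↔
        ((∃ t ∈ pvTagsB, t.toList <:+ done ++ [c]) ∨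
         (∃ t ∈ pvTagsB, ∃ j, 1 ≤ j ∧ j ≤ rest.length ∧
            t.toList <:+ (done ++ [c]) ++ rest.take j)) := by
      constructor
      · rintro ⟨t, ht, i, h1, h2, h3⟩
        rcases Nat.exists_eq_add_of_le h1 with ⟨j, rfl⟩
        rcases Nat.eq_zero_or_pos j with rfl | hj
        · left; exact ⟨t, ht, by simpa using h3⟩
        · right
          refine ⟨t, ht, j, hj, ?_, ?_⟩
          · simp only [List.length_cons] at h2; omega
          · have : (c :: rest).take (1 + j) = c :: rest.take j := by
              rw [Nat.add_comm]; simp [List.take_succ_cons]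
            rw [this] at h3
            simpa [List.append_assoc] using h3
      · rintro (⟨t, ht, h⟩ | ⟨t, ht, j, h1, h2, h3⟩)
        · exact ⟨t, ht, 1, le_refl 1, by simp, by simpa using h⟩
        · refine ⟨t, ht, j + 1, by omega, by simp; omega, ?_⟩
          rw [List.take_succ_cons]
          simpa [List.append_assoc] using h3
    by_cases h : (pvTagsB.any fun t => t.toList.isSuffixOf (pvLastW (done ++ [c]))) = true
    · rw [if_pos h]
      exact (iff_of_true rfl (hsplit.mpr (Or.inl (hnow.mp h))))
    · rw [if_neg h, ih (done ++ [c]), hsplit]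
      constructor
      · intro hr; exact Or.inr hr
      · rintro (hl | hr)
        · exact absurd (hnow.mpr hl) h
        · exact hr

-- a nonempty list is an infix iff it is a suffix of some nonempty prefix
theorem pv_infix_iff_suffix_take (t l : List Char) (hne : t ≠ []) :
    (∃ i, 1 ≤ i ∧ i ≤ l.length ∧ t <:+ l.take i) ↔ t <:+: l := by
  constructor
  · rintro ⟨i, _, _, hs⟩
    exact hs.isInfix.trans (List.take_prefix i l).isInfix
  · rintro ⟨a, b, rfl⟩
    have ht1 : 1 ≤ t.length := List.length_pos_of_ne_nil hne
    refine ⟨a.length + t.length, by omega, by simp only [List.length_append]; omega, ?_⟩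
    have hlen : (a ++ t).length = a.length + t.length := by simp
    rw [show ((a ++ t) ++ b).take (a.length + t.length) = a ++ t from List.take_left' hlen]
    exact List.suffix_append a t

-- A's loop with early return is an existential over the tag list
theorem pvLoopA_iff (tags : List String) (word : String) :
    pvLoopA tags word = true ↔ ∃ t ∈ tags, t.toList <:+: word.toList := by
  induction tags with
  | nil => simp [pvLoopA]
  | cons t ts ih =>
    simp only [pvLoopA, List.mem_cons]
    by_cases h : PySem.Str.isIn t word = true
    · rw [if_pos h]
      exact iff_of_true rfl ⟨t, Or.inl rfl, (PySem.Str.isIn_iff_infix t word).mp h⟩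
    · rw [if_neg h, ih]
      constructor
      · rintro ⟨u, hu, hi⟩; exact ⟨u, Or.inr hu, hi⟩
      · rintro ⟨u, hu | hu, hi⟩
        · exact absurd ((PySem.Str.isIn_iff_infix t word).mpr (hu ▸ hi)) h
        · exact ⟨u, hu, hi⟩

-- ===== VERDICT (by name: the statement is the Claim_ definition above) =====
theorem excluded_keyword_in_spec : Claim_equal_excluded_keyword_in := by
  intro word _
  show excluded_keyword_in word = excluded_keyword_in_alt word
  have hA := pvLoopA_iff pvTagsA word
  have hB : excluded_keyword_in_alt word = true ↔
      ∃ t ∈ pvTagsB, ∃ i, 1 ≤ i ∧ i ≤ word.toList.length ∧ t.toList <:+ word.toList.take i := by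
    have := pvScanB_iff word.toList []
    simpa [excluded_keyword_in_alt, pvLastW] using this
  have hAB : excluded_keyword_in word = true ↔ excluded_keyword_in_alt word = true := by
    rw [show excluded_keyword_in word = pvLoopA pvTagsA word from rfl, hA, hB]
    constructor
    · rintro ⟨t, ht, hi⟩
      exact ⟨t, ht, (pv_infix_iff_suffix_take t.toList word.toList (pvTag_ne_nil t ht)).mpr hi⟩
    · rintro ⟨t, ht, hi⟩
      exact ⟨t, ht, (pv_infix_iff_suffix_take t.toList word.toList (pvTag_ne_nil t ht)).mp hi⟩
  by_cases h : excluded_keyword_in word = true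
  · rw [h, (hAB.mp h).symm]
  · rw [Bool.eq_false_iff.mpr h, Bool.eq_false_iff.mpr (fun hc => h (hAB.mpr hc))]
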